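-- pv_equiv track=rewrite | github.com/AlexanderTankov/HackBulgaria-Programming-101 | Week 0 Part 2/is_an_bn.py | is_an_bn
-- ===== SOURCE A (Python) =====
-- def is_an_bn(word):
--     num_of_a = 0
--     num_of_b = 0
--     flag = True
--     word = word.lower()
--     for char in range(0, len(word)):
--         if flag:
--             if word[char] == 'a':
--                 num_of_a += 1
--             if word[char] == 'b':
--                 num_of_b += 1
--                 flag = False
--         else:
--             if word[char] == 'a':
--                 return False
--             if word[char] == 'b':
--                 num_of_b += 1
--     return num_of_a == num_of_b
-- ===== SOURCE B (Python) =====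
-- def is_an_bn(word):
--     word = word.lower()
--     i = word.find('b')
--     if i == -1:
--         return 'a' not in word
--     tail = word[i:]
--     if 'a' in tail:
--         return False
--     return word[:i].count('a') == tail.count('b')
-- ===== Notes on version B (the rewrite author's own statement) =====
-- stated objective: simpler
-- what changed: Replaces A's single flagged scan with explicit counters by splitting the lowercased word at the first occurrence of the letter b (str.find) followed by a membership test and two count passes.
import Mathlib
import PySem

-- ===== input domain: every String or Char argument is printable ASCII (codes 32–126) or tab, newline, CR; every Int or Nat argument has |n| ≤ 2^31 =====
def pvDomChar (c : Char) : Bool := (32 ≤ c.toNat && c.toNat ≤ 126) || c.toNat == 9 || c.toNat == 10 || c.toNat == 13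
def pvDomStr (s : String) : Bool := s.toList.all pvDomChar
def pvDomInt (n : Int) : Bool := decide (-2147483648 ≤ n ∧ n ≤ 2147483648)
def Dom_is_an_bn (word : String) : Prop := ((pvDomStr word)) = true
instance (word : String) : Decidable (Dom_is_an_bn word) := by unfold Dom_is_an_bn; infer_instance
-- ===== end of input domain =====

-- B replaces A's single flagged scan with a split at the first 'b' and two count passes (simpler decomposition, same cost).

-- ===== PORT A =====
-- the for-loop over indices reads the characters in order; ported as structural
-- recursion over the character list with the same state (num_of_a, num_of_b, flag)
def isAnBnLoopA : List Char → Int → Int → Bool → Bool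
  | [], na, nb, _ => na == nb
  | c :: cs, na, nb, true =>
      let na' := if c == 'a' then na + 1 else na
      if c == 'b' then isAnBnLoopA cs na' (nb + 1) false
      else isAnBnLoopA cs na' nb true
  | c :: cs, na, nb, false =>
      if c == 'a' then false
      else if c == 'b' then isAnBnLoopA cs na (nb + 1) false
      else isAnBnLoopA cs na nb false

def is_an_bn (word : String) : Bool :=
  isAnBnLoopA (PySem.Str.lower word).toList 0 0 true

-- ===== PORT B =====
def is_an_bn_alt (word : String) : Bool :=
  let w := PySem.Str.lower word
  let i := PySem.Str.find w "b"
  if i == -1 then !(PySem.Str.isIn "a" w)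
  else
    let tail := PySem.Str.slice w (some i) none
    if PySem.Str.isIn "a" tail then false
    else PySem.Str.count (PySem.Str.slice w none (some i)) "a" == PySem.Str.count tail "b"

-- ===== PRECONDITION & SPEC =====
def Spec_is_an_bn (word : String) (out : Bool) : Prop := out = is_an_bn_alt word
instance (word : String) (out : Bool) : Decidable (Spec_is_an_bn word out) := by unfold Spec_is_an_bn; infer_instance

-- ===== CLAIM (what is proved, stated in full; the proofs are below) =====
def Claim_equal_is_an_bn : Prop := ∀ (word : String), Dom_is_an_bn word → Spec_is_an_bn word (is_an_bn word)

-- ===== LEMMAS AND PROOFS =====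

-- Python's s.count(c) for a single character is the plain character count
theorem countGo_singleton (c : Char) : ∀ (fuel : Nat) (s : List Char) (acc : Nat),
    s.length ≤ fuel → PySem.Chars.count.go [c] fuel s acc = acc + s.count c := by
  intro fuel
  induction fuel with
  | zero => intro s acc h; cases s with
      | nil => simp [PySem.Chars.count.go]
      | cons x t => simp at h
  | succ n ih =>
      intro s acc h
      cases s with
      | nil => simp [PySem.Chars.count.go]
      | cons x t =>
          have hlen : t.length ≤ n := by simpa using Nat.le_of_succ_le_succ h
          simp only [PySem.Chars.count.go, List.isPrefixOf, Bool.and_true]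
          by_cases hc : c = x
          · rw [if_pos (by simp [hc])]
            simp only [List.length_singleton, List.drop_succ_cons, List.drop_zero]
            rw [ih t (acc + 1) hlen]
            simp [hc]
            omega
          · rw [if_neg (by simp [hc])]
            rw [ih t acc hlen]
            have hxc : (x == c) = false := beq_eq_false_iff_ne.mpr (fun h => hc h.symm)
            simp [List.count_cons, hxc]

theorem count_singleton (s : List Char) (c : Char) :
    PySem.Chars.count s [c] = s.count c := by
  have := countGo_singleton c s.length s 0 le_rfl
  simpa [PySem.Chars.count] using this

-- `c in s` for a single character is membership
theorem isIn_singleton (c : Char) (s : List Char) :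
    PySem.Chars.isIn [c] s = s.contains c := by
  rcases h : PySem.Chars.isIn [c] s with _ | _
  · have := (PySem.Chars.isIn_eq_false_iff _ _).mp h
    rw [List.singleton_infix_iff] at this
    simp [List.contains_eq_mem, this]
  · have := (PySem.Chars.isIn_iff_infix _ _).mp h
    rw [List.singleton_infix_iff] at this
    simp [List.contains_eq_mem, this]

-- s.find(c) points at the first occurrence of the character c
theorem find_singleton_split (p q : List Char) (c : Char) (hp : c ∉ p) :
    PySem.Chars.find (p ++ c :: q) [c] = (p.length : Int) := by
  set s := p ++ c :: q with hs
  have hmem : c ∈ s := by simp [hs]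
  have hinf : [c] <:+: s := (List.singleton_infix_iff c s).mpr hmem
  have hnn : 0 ≤ PySem.Chars.find s [c] := (PySem.Chars.find_nonneg_iff s [c]).mpr hinf
  obtain ⟨hpre, hmin⟩ := PySem.Chars.find_spec (s := s) (sub := [c]) hnn
  set k := (PySem.Chars.find s [c]).toNat with hk
  have hgetp : ∀ j, j < p.length → s[j]? ≠ some c := by
    intro j hj heq
    rw [hs, List.getElem?_append_left hj] at heq
    exact hp (List.mem_of_getElem? heq)
  have hgetb : s[p.length]? = some c := by
    rw [hs]
    simpa using List.getElem?_append_right (l₁ := p) (l₂ := c :: q) le_rfl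
  have hhead : ∀ j, ([c] <+: s.drop j) ↔ s[j]? = some c := by
    intro j
    constructor
    · rintro ⟨t, ht⟩
      have : (s.drop j).head? = some c := by rw [← ht]; simp
      simpa [List.head?_drop] using this
    · intro hj
      have : (s.drop j).head? = some c := by simpa [List.head?_drop] using hj
      cases hd : s.drop j with
      | nil => simp [hd] at this
      | cons x t =>
          rw [hd] at this; simp at this
          exact ⟨t, by simp [this]⟩
  have hklt : ¬ k < p.length := by
    intro hlt
    exact hgetp k hlt ((hhead k).mp hpre)
  have hkgt : ¬ p.length < k := by
    intro hgt
    exact hmin p.length hgt ((hhead p.length).mpr hgetb)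
  have : k = p.length := by omega
  omega

-- A's loop after the first 'b' (flag = False): any 'a' returns False, otherwise it
-- just adds the remaining 'b' count
theorem loopA_false (cs : List Char) : ∀ (na nb : Int),
    isAnBnLoopA cs na nb false =
      (!cs.contains 'a' && (na == nb + (cs.count 'b' : Int))) := by
  induction cs with
  | nil => intro na nb; simp [isAnBnLoopA]
  | cons c cs ih =>
      intro na nb
      by_cases ha : c = 'a'
      · subst ha; simp [isAnBnLoopA]
      · by_cases hb : c = 'b'
        · subst hb
          simp [isAnBnLoopA, ih]
          rw [show nb + 1 + (cs.count 'b' : Int) = nb + ((cs.count 'b' : Int) + 1) by ring]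
        · simp [isAnBnLoopA, ha, hb, ih, Ne.symm ha]

-- A's loop before any 'b' (flag = True), when no 'b' follows
theorem loopA_true_no_b (cs : List Char) (hb : 'b' ∉ cs) : ∀ (na nb : Int),
    isAnBnLoopA cs na nb true = (na + (cs.count 'a' : Int) == nb) := by
  induction cs with
  | nil => intro na nb; simp [isAnBnLoopA]
  | cons c cs ih =>
      intro na nb
      have hcb : c ≠ 'b' := fun h => hb (by simp [h])
      have hb' : 'b' ∉ cs := fun h => hb (by simp [h])
      by_cases ha : c = 'a'
      · subst ha
        simp [isAnBnLoopA, ih hb']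
        constructor <;> intro h <;> [push_cast; push_cast at h] <;> omega
      · simp [isAnBnLoopA, ha, hcb, ih hb']

-- A's loop across the prefix before the first 'b'
theorem loopA_true_split (p : List Char) (q : List Char) (hp : 'b' ∉ p) : ∀ (na nb : Int),
    isAnBnLoopA (p ++ 'b' :: q) na nb true =
      isAnBnLoopA q (na + (p.count 'a' : Int)) (nb + 1) false := by
  induction p with
  | nil => intro na nb; simp [isAnBnLoopA]
  | cons c p ih =>
      intro na nb
      have hcb : c ≠ 'b' := fun h => hp (by simp [h])
      have hp' : 'b' ∉ p := fun h => hp (by simp [h])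
      by_cases ha : c = 'a'
      · subst ha
        simp [isAnBnLoopA, ih hp']
        ring_nf
      · simp [isAnBnLoopA, ha, hcb, ih hp']

-- every string containing 'b' splits at its FIRST 'b'
theorem first_b_split (cs : List Char) (hb : 'b' ∈ cs) :
    ∃ p q, cs = p ++ 'b' :: q ∧ 'b' ∉ p := by
  induction cs with
  | nil => simp at hb
  | cons c cs ih =>
      by_cases hc : c = 'b'
      · exact ⟨[], cs, by simp [hc], by simp⟩
      · have hb' : 'b' ∈ cs := by
          rcases List.mem_cons.mp hb with h | h
          · exact absurd h (fun h' => hc h'.symm)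
          · exact h
        obtain ⟨p, q, hsplit, hp⟩ := ih hb'
        refine ⟨c :: p, q, by simp [hsplit], ?_⟩
        intro h
        rcases List.mem_cons.mp h with h' | h'
        · exact hc h'.symm
        · exact hp h' 

-- ===== VERDICT (by name: the statement is the Claim_ definition above) =====
theorem is_an_bn_spec : Claim_equal_is_an_bn := by
  intro word _
  unfold Spec_is_an_bn is_an_bn is_an_bn_alt
  simp only [PySem.Str.find_eq, PySem.Str.isIn_eq, PySem.Str.count_eq,
    PySem.Str.toList_slice, PySem.Str.toList_lower, PySem.Chars.slice_eq_listSlice]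
  simp only [show "b".toList = ['b'] from rfl, show "a".toList = ['a'] from rfl]
  generalize PySem.Chars.lower word.toList = L
  by_cases hb : 'b' ∈ L
  · obtain ⟨p, q, hsplit, hp⟩ := first_b_split L hb
    subst hsplit
    have hfind : PySem.Chars.find (p ++ 'b' :: q) [('b' : Char)] = (p.length : Int) :=
      find_singleton_split p q 'b' hp
    have hdrop : PySem.List.slice (p ++ 'b' :: q) (some ((p.length : Nat) : Int)) none
        = 'b' :: q := by
      rw [PySem.List.slice_from_natCast]
      exact List.drop_left
    have htake : PySem.List.slice (p ++ 'b' :: q) none (some ((p.length : Nat) : Int))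
        = p := by
      rw [PySem.List.slice_to_natCast]
      exact List.take_left
    rw [loopA_true_split p q hp 0 0, loopA_false]
    simp only [hfind, hdrop, htake, count_singleton, isIn_singleton]
    have hne : ((p.length : Int) == -1) = false := by simp
    rw [hne]
    simp only [Bool.false_eq_true, if_false]
    have hcont : (('b' :: q).contains 'a') = q.contains 'a' := by simp
    rw [hcont]
    by_cases ha : 'a' ∈ q
    · simp [ha]
    · have h1 : q.contains 'a' = false := by simp [ha]
      rw [h1]
      simp only [Bool.not_false, Bool.true_and, Bool.false_eq_true, if_false,
        List.count_cons_self]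
      rw [Bool.eq_iff_iff]
      simp only [beq_iff_eq]
      omega
  · have hfind : PySem.Chars.find L [('b' : Char)] = -1 :=
      (PySem.Chars.find_eq_neg_one_iff _ _).mpr
        (fun h => hb ((List.singleton_infix_iff _ _).mp h))
    rw [loopA_true_no_b L hb 0 0]
    simp only [hfind, isIn_singleton]
    simp only [show ((-1 : Int) == -1) = true from by decide, if_true]
    rw [Bool.eq_iff_iff]
    by_cases ha : 'a' ∈ L
    · have h2 : 0 < L.count 'a' := List.count_pos_iff.mpr ha
      have h1 : L.contains 'a' = true := by simp [ha]
      simp only [h1, Bool.not_true, beq_iff_eq, Bool.false_eq_true, iff_false]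
      omega
    · have h2 : L.count 'a' = 0 := List.count_eq_zero.mpr ha
      have h1 : L.contains 'a' = false := by simp [ha]
      simp [h2, ha]
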